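-- pv_equiv track=rewrite | github.com/hugolepeytre/aoc2022 | day25/problem_1.py | snafu_to_base10int
-- ===== SOURCE A (Python) =====
-- def snafu_to_base10int(s):
--     res = 0
--     pow = 1
--     for snafu_digit in s[::-1]:
--         match snafu_digit:
--             case "=":
--                 res -= 2 * pow
--             case "-":
--                 res -= pow
--             case _:
--                 res += int(snafu_digit) * pow
--         pow *= 5
--     return res
-- ===== SOURCE B (Python) =====
-- def snafu_to_base10int(s):
--     res = 0
--     for c in s:
--         if c == "=":
--             v = -2
--         elif c == "-":
--             v = -1
--         else:
--             v = int(c)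
--         res = res * 5 + v
--     return res
-- ===== Notes on version B (the rewrite author's own statement) =====
-- stated objective: idiomatic
-- what changed: Horner's method: a single forward pass accumulating res = res*5 + digit, eliminating the string reversal and the power-of-5 accumulator.
-- outside the precondition, e.g. on snafu_to_base10int('1x2'): A raises ValueError, B raises ValueError
import Mathlib
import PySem

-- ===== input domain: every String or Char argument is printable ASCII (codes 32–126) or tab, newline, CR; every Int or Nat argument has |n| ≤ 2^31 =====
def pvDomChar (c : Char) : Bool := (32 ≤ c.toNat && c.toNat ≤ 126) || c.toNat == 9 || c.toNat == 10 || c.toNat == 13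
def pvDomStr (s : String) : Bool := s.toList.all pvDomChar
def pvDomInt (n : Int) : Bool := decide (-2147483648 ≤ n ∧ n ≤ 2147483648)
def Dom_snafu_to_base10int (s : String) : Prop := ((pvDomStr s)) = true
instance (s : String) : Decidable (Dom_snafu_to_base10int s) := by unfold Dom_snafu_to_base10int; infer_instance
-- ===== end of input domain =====

-- B changes A's reversed loop with a power-of-5 accumulator into a single forward Horner pass (idiomatic; same behaviour).

-- ===== PORT A =====
-- A's loop over s[::-1] with state (res, pow); int(c) ported via PySem.Int.ofStr?
-- (getD 0 is never reached under Pre_, which excludes the ValueError inputs).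
def snafuStepA (st : Int × Int) (c : Char) : Int × Int :=
  if c = '=' then (st.1 - 2 * st.2, st.2 * 5)
  else if c = '-' then (st.1 - st.2, st.2 * 5)
  else (st.1 + (PySem.Int.ofStr? (String.mk [c])).getD 0 * st.2, st.2 * 5)

def snafu_to_base10int (s : String) : Int :=
  (s.toList.reverse.foldl snafuStepA (0, 1)).1

-- ===== PORT B =====
-- Horner: res = res * 5 + value of c, forward over s.
def snafuVal (c : Char) : Int :=
  if c = '=' then -2
  else if c = '-' then -1
  else (PySem.Int.ofStr? (String.mk [c])).getD 0

def snafu_to_base10int_alt (s : String) : Int :=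
  s.toList.foldl (fun res c => res * 5 + snafuVal c) 0

-- ===== PRECONDITION & SPEC =====
-- Pre_ excludes exactly the inputs where A's int(c) raises ValueError (any char other
-- than '=', '-' or an ASCII digit).
def Pre_snafu_to_base10int (s : String) : Prop :=
  s.toList.all (fun c => c = '=' ∨ c = '-' ∨ c.isDigit) = true
instance (s : String) : Decidable (Pre_snafu_to_base10int s) := by unfold Pre_snafu_to_base10int; infer_instance
def pvWitness_snafu_to_base10int : String := "1=-0-2"

def Spec_snafu_to_base10int (s : String) (out : Int) : Prop := out = snafu_to_base10int_alt s
instance (s : String) (out : Int) : Decidable (Spec_snafu_to_base10int s out) := by unfold Spec_snafu_to_base10int; infer_instance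

-- ===== CLAIM (what is proved, stated in full; the proofs are below) =====
def Claim_equal_snafu_to_base10int : Prop := ∀ (s : String), Dom_snafu_to_base10int s → Pre_snafu_to_base10int s → Spec_snafu_to_base10int s (snafu_to_base10int s)

-- ===== LEMMAS AND PROOFS =====

-- Horner over l ++ [c] appends c as the least-significant digit.
theorem snafu_horner_append (l : List Char) (a : Int) (c : Char) :
    (l ++ [c]).foldl (fun res c => res * 5 + snafuVal c) a
      = (l.foldl (fun res c => res * 5 + snafuVal c) a) * 5 + snafuVal c := by
  simp [List.foldl_append]

-- A's fold over l (the reversed string) equals r + p * Horner(l.reverse).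
theorem snafuA_fold (l : List Char) (r p : Int) :
    (l.foldl snafuStepA (r, p)).1
      = r + p * (l.reverse.foldl (fun res c => res * 5 + snafuVal c) 0) := by
  induction l generalizing r p with
  | nil => simp
  | cons c t ih =>
    simp only [List.foldl_cons, List.reverse_cons, snafu_horner_append]
    rw [show snafuStepA (r, p) c = (r + snafuVal c * p, p * 5) by
      simp only [snafuStepA, snafuVal]; split_ifs <;> simp <;> ring]
    rw [ih]; ring

-- ===== VERDICT (by name: the statement is the Claim_ definition above) =====
theorem snafu_to_base10int_spec : Claim_equal_snafu_to_base10int := by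
  intro s _ _
  unfold Spec_snafu_to_base10int snafu_to_base10int snafu_to_base10int_alt
  rw [snafuA_fold]
  simp
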